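-- pv_equiv track=rewrite | github.com/01rabbit/Azazel-Gadget | py/azazel_gadget/sensors/wifi_channel_scanner.py | _calculate_congestion
-- ===== SOURCE A (Python) =====
-- from typing import Dict, List, Optional, Tuple
--
-- def _calculate_congestion(current_ch: int, channel_usage: Dict[int, int]) -> str:
--     """混雑度を計算"""
--     # 現在のチャンネル + 隣接チャンネルのAP数を合計
--     adjacent_channels = []
--
--     # 2.4GHzの場合、±2チャンネルが干渉する
--     if 1 <= current_ch <= 14:
--         adjacent_channels = [current_ch - 2, current_ch - 1, current_ch, current_ch + 1, current_ch + 2]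
--         adjacent_channels = [ch for ch in adjacent_channels if 1 <= ch <= 14]
--     # 5GHzの場合、隣接チャンネルの影響は少ない
--     else:
--         adjacent_channels = [current_ch]
--
--     total_aps = sum(channel_usage.get(ch, 0) for ch in adjacent_channels)
--
--     # 混雑度の判定
--     if total_aps == 0:
--         return "none"
--     elif total_aps <= 2:
--         return "low"
--     elif total_aps <= 5:
--         return "medium"
--     elif total_aps <= 10:
--         return "high"
--     else:
--         return "critical"
-- ===== SOURCE B (Python) =====
-- def _calculate_congestion(current_ch: int, channel_usage: dict) -> str:
--     """Single pass over the observed channels; branchless arithmetic index into the label table."""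
--     in_24 = 1 <= current_ch <= 14
--     total = 0
--     for ch, count in channel_usage.items():
--         if (abs(ch - current_ch) <= 2 and 1 <= ch <= 14) if in_24 else ch == current_ch:
--             total += count
--     idx = (total != 0) + (total > 2) + (total > 5) + (total > 10)
--     return ("none", "low", "medium", "high", "critical")[idx]
-- ===== Notes on version B (the rewrite author's own statement) =====
-- stated objective: alternative
-- what changed: B never builds A's adjacent-channel list or does dict lookups: it makes one pass over the dict's items summing values whose key satisfies the interference predicate (|ch-current|<=2 within 1..14 for 2.4GHz, equality otherwise), and replaces the if/elif ladder with a branchless arithmetic index (total!=0)+(total>2)+(total>5)+(total>10) into a label tuple.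
import Mathlib
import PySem

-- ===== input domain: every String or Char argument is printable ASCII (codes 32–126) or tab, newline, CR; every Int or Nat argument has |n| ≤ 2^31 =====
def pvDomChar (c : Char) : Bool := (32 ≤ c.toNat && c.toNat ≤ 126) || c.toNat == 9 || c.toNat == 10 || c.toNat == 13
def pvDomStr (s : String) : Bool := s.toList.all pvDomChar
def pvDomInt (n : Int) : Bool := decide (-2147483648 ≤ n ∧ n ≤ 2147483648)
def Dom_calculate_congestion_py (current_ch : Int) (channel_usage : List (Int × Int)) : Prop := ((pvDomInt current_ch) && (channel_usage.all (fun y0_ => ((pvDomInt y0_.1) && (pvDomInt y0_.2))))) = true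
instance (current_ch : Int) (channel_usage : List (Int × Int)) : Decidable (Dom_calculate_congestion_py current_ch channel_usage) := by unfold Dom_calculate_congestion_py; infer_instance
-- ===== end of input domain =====

-- B makes one pass over the observed channels (dict items) with an interference predicate and
-- classifies by a branchless arithmetic index into the label table; objective: simpler.

-- ===== PORT A =====
def calculate_congestion_py (current_ch : Int) (channel_usage : List (Int × Int)) : String :=
  let adjacent : List Int :=
    if 1 ≤ current_ch ∧ current_ch ≤ 14 then
      ([current_ch - 2, current_ch - 1, current_ch, current_ch + 1, current_ch + 2]).filter
        (fun ch => decide (1 ≤ ch ∧ ch ≤ 14))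
    else [current_ch]
  let total_aps : Int :=
    (adjacent.map (fun ch => PySem.Dict.getD (PySem.Dict.mk channel_usage) ch 0)).sum
  if total_aps = 0 then "none"
  else if total_aps ≤ 2 then "low"
  else if total_aps ≤ 5 then "medium"
  else if total_aps ≤ 10 then "high"
  else "critical"

-- ===== PORT B =====
def calculate_congestion_py_alt (current_ch : Int) (channel_usage : List (Int × Int)) : String :=
  let in24 : Bool := decide (1 ≤ current_ch ∧ current_ch ≤ 14)
  let total : Int := channel_usage.foldl
    (fun acc p =>
      if (if in24 then decide (|p.1 - current_ch| ≤ 2 ∧ 1 ≤ p.1 ∧ p.1 ≤ 14) else p.1 == current_ch)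
      then acc + p.2 else acc) 0
  let idx : Int :=
    (if total ≠ 0 then 1 else 0) + (if total > 2 then 1 else 0) +
    (if total > 5 then 1 else 0) + (if total > 10 then 1 else 0)
  -- the index is always in 0..4, so the lookup never fails; "" is unreachable
  match PySem.List.pyGet? ["none", "low", "medium", "high", "critical"] idx with
  | some s => s
  | none => ""

-- ===== PRECONDITION & SPEC =====
-- Pre_ excludes association lists with duplicate keys, which do not correspond to any Python dict
-- (every real input to A is a dict, whose keys are distinct); no input A runs on is excluded.
def Pre_calculate_congestion_py (current_ch : Int) (channel_usage : List (Int × Int)) : Prop :=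
  (channel_usage.map Prod.fst).Nodup
instance (current_ch : Int) (channel_usage : List (Int × Int)) : Decidable (Pre_calculate_congestion_py current_ch channel_usage) := by unfold Pre_calculate_congestion_py; infer_instance

def pvWitness_calculate_congestion_py : Int × (List (Int × Int)) := (6, [(5, 1), (8, 2)])

def Spec_calculate_congestion_py (current_ch : Int) (channel_usage : List (Int × Int)) (out : String) : Prop := out = calculate_congestion_py_alt current_ch channel_usage
instance (current_ch : Int) (channel_usage : List (Int × Int)) (out : String) : Decidable (Spec_calculate_congestion_py current_ch channel_usage out) := by unfold Spec_calculate_congestion_py; infer_instance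

-- ===== CLAIM (what is proved, stated in full; the proofs are below) =====
def Claim_equal_calculate_congestion_py : Prop := ∀ (current_ch : Int) (channel_usage : List (Int × Int)), Dom_calculate_congestion_py current_ch channel_usage → Pre_calculate_congestion_py current_ch channel_usage → Spec_calculate_congestion_py current_ch channel_usage (calculate_congestion_py current_ch channel_usage)

-- ===== LEMMAS AND PROOFS =====

-- B's accumulating pass equals init + the sum of the values selected by the predicate
theorem pv_foldl_eq_sum (P : Int × Int → Bool) (d : List (Int × Int)) (init : Int) :
    d.foldl (fun acc p => if P p then acc + p.2 else acc) init
      = init + ((d.filter P).map Prod.snd).sum := by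
  induction d generalizing init with
  | nil => simp
  | cons q rest ih =>
      by_cases h : P q = true <;> simp [List.foldl, List.filter, h, ih] <;> ring

-- a missing key looks up to the default
theorem pv_getD_of_not_mem (d : List (Int × Int)) (k : Int)
    (h : k ∉ d.map Prod.fst) :
    PySem.Dict.getD (PySem.Dict.mk d) k 0 = 0 := by
  induction d with
  | nil => rfl
  | cons q rest ih =>
      simp only [List.map, List.mem_cons, not_or] at h
      rw [show PySem.Dict.mk (q :: rest) = PySem.Dict.mk ((q.1, q.2) :: rest) by simp,
        PySem.Dict.getD_eq_get?_getD, PySem.Dict.get?_mk_cons]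
      have : (q.1 == k) = false := by simp [Ne.symm h.1]
      rw [this]
      simp only [if_neg Bool.false_ne_true]
      rw [← PySem.Dict.getD_eq_get?_getD]
      exact ih h.2

-- summing a pointwise-updated function over a duplicate-free list
theorem pv_sum_update (W : List Int) (k v : Int) (f : Int → Int)
    (hW : W.Nodup) (hf : f k = 0) :
    (W.map (fun ch => if ch = k then v else f ch)).sum
      = (if k ∈ W then v else 0) + (W.map f).sum := by
  induction W with
  | nil => simp
  | cons w rest ih =>
      have hnd := (List.nodup_cons.mp hW)
      by_cases hw : w = k
      · subst hw
        have : w ∉ rest := hnd.1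
        have hres : (rest.map (fun ch => if ch = w then v else f ch)).sum = (rest.map f).sum := by
          congr 1
          apply List.map_congr_left
          intro x hx
          have : x ≠ w := fun he => this (he ▸ hx)
          simp [this]
        simp [List.map, hres, hf]
      · have hkw : ¬ k = w := fun e => hw e.symm
        have := ih hnd.2
        by_cases hk : k ∈ rest <;> simp [List.map, hw, hkw, hk, this] <;> ring
  
-- with duplicate-free keys, A's window sum equals the filtered value sum over the items
theorem pv_window_sum (W : List Int) (d : List (Int × Int))
    (hW : W.Nodup) (hd : (d.map Prod.fst).Nodup) :
    (W.map (fun ch => PySem.Dict.getD (PySem.Dict.mk d) ch 0)).sum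
      = ((d.filter (fun p => decide (p.1 ∈ W))).map Prod.snd).sum := by
  induction d with
  | nil =>
      have h0 : ∀ ch : Int, PySem.Dict.getD (PySem.Dict.mk ([] : List (Int × Int))) ch 0 = 0 :=
        fun ch => rfl
      simp [h0]
  | cons q rest ih =>
      simp only [List.map, List.nodup_cons] at hd
      have hget : ∀ ch, PySem.Dict.getD (PySem.Dict.mk (q :: rest)) ch 0
          = if ch = q.1 then q.2 else PySem.Dict.getD (PySem.Dict.mk rest) ch 0 := by
        intro ch
        rw [show PySem.Dict.mk (q :: rest) = PySem.Dict.mk ((q.1, q.2) :: rest) by simp,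
          PySem.Dict.getD_eq_get?_getD, PySem.Dict.get?_mk_cons]
        by_cases h : ch = q.1
        · simp [h]
        · have : (q.1 == ch) = false := by simp [Ne.symm h]
          rw [this]
          simp only [if_neg Bool.false_ne_true, ← PySem.Dict.getD_eq_get?_getD, h, if_false]
      have hrest0 : PySem.Dict.getD (PySem.Dict.mk rest) q.1 0 = 0 :=
        pv_getD_of_not_mem rest q.1 hd.1
      calc (W.map (fun ch => PySem.Dict.getD (PySem.Dict.mk (q :: rest)) ch 0)).sum
          = (W.map (fun ch => if ch = q.1 then q.2
              else PySem.Dict.getD (PySem.Dict.mk rest) ch 0)).sum := by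
            congr 1; exact List.map_congr_left (fun ch _ => hget ch)
        _ = (if q.1 ∈ W then q.2 else 0)
              + (W.map (fun ch => PySem.Dict.getD (PySem.Dict.mk rest) ch 0)).sum :=
            pv_sum_update W q.1 q.2 _ hW hrest0
        _ = ((( q :: rest).filter (fun p => decide (p.1 ∈ W))).map Prod.snd).sum := by
            rw [ih hd.2]
            by_cases h : q.1 ∈ W <;> simp [List.filter, h]

-- the if/elif ladder equals the arithmetic index into the label table
theorem pv_classify_eq (t : Int) :
    (if t = 0 then "none"
     else if t ≤ 2 then "low"
     else if t ≤ 5 then "medium"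
     else if t ≤ 10 then "high"
     else "critical")
    = (match PySem.List.pyGet? ["none", "low", "medium", "high", "critical"]
        ((if t ≠ 0 then 1 else 0) + (if t > 2 then 1 else 0) +
         (if t > 5 then 1 else 0) + (if t > 10 then 1 else 0)) with
       | some s => s
       | none => "") := by
  by_cases h0 : t = 0
  · subst h0; decide
  by_cases h2 : t ≤ 2
  · have : ¬ t > 2 := by omega
    have h5 : ¬ t > 5 := by omega
    have h10 : ¬ t > 10 := by omega
    simp only [h0, h2, ‹¬ t > 2›, h5, h10, ne_eq, not_false_iff, if_true, if_false]
    decide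
  by_cases h5 : t ≤ 5
  · have : t > 2 := by omega
    have h10' : ¬ t > 5 := by omega
    have h10 : ¬ t > 10 := by omega
    simp only [h0, h2, h5, this, h10', h10, ne_eq, not_false_iff, if_true, if_false]
    decide
  by_cases h10 : t ≤ 10
  · have g2 : t > 2 := by omega
    have g5 : t > 5 := by omega
    have g10 : ¬ t > 10 := by omega
    simp only [h0, h2, h5, h10, g2, g5, g10, ne_eq, not_false_iff, if_true, if_false]
    decide
  · have g2 : t > 2 := by omega
    have g5 : t > 5 := by omega
    have g10 : t > 10 := by omega
    simp only [h0, h2, h5, h10, g2, g5, g10, ne_eq, not_false_iff, if_true, if_false]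
    decide

-- A's filtered window is duplicate-free and membership in it is B's interference predicate
theorem pv_window_nodup (c : Int) :
    (([c - 2, c - 1, c, c + 1, c + 2]).filter (fun ch => decide (1 ≤ ch ∧ ch ≤ 14))).Nodup := by
  apply List.Nodup.filter
  simp only [List.nodup_cons, List.mem_cons, List.not_mem_nil, List.nodup_nil, or_false,
    and_true, not_or, not_false_eq_true]
  omega

theorem pv_window_mem (c ch : Int) (h1 : 1 ≤ c) (h2 : c ≤ 14) :
    decide (|ch - c| ≤ 2 ∧ 1 ≤ ch ∧ ch ≤ 14)
      = decide (ch ∈ ([c - 2, c - 1, c, c + 1, c + 2]).filter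
          (fun x => decide (1 ≤ x ∧ x ≤ 14))) := by
  have : (|ch - c| ≤ 2 ∧ 1 ≤ ch ∧ ch ≤ 14)
      ↔ ch ∈ ([c - 2, c - 1, c, c + 1, c + 2]).filter (fun x => decide (1 ≤ x ∧ x ≤ 14)) := by
    rw [List.mem_filter]
    simp only [List.mem_cons, List.not_mem_nil, or_false, decide_eq_true_eq, abs_le]
    omega
  simp [this]

-- ===== VERDICT (by name: the statement is the Claim_ definition above) =====
theorem calculate_congestion_py_spec : Claim_equal_calculate_congestion_py := by
  intro c d _ hpre
  unfold Spec_calculate_congestion_py calculate_congestion_py calculate_congestion_py_alt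
  by_cases h : 1 ≤ c ∧ c ≤ 14
  · have hb : decide (1 ≤ c ∧ c ≤ 14) = true := decide_eq_true h
    rw [if_pos h]
    simp only [hb, if_true]
    rw [pv_foldl_eq_sum, zero_add,
      pv_window_sum _ _ (pv_window_nodup c) hpre]
    have hfilter :
        d.filter (fun p => (decide (|p.1 - c| ≤ 2 ∧ 1 ≤ p.1 ∧ p.1 ≤ 14) : Bool))
          = d.filter (fun p => decide (p.1 ∈ ([c - 2, c - 1, c, c + 1, c + 2]).filter
              (fun x => decide (1 ≤ x ∧ x ≤ 14)))) := by
      apply List.filter_congr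
      intro p _
      exact pv_window_mem c p.1 h.1 h.2
    rw [← hfilter]
    exact pv_classify_eq _
  · have hb : decide (1 ≤ c ∧ c ≤ 14) = false := decide_eq_false h
    rw [if_neg h]
    simp only [hb, Bool.false_eq_true, if_false]
    rw [pv_foldl_eq_sum, zero_add,
      pv_window_sum [c] d (List.nodup_singleton c) hpre]
    have hfilter :
        d.filter (fun p => (p.1 == c : Bool))
          = d.filter (fun p => decide (p.1 ∈ [c])) := by
      apply List.filter_congr
      intro p _
      by_cases hpc : p.1 = c <;> simp [hpc]
    rw [← hfilter]
    exact pv_classify_eq _
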